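-- pv_equiv track=rewrite | github.com/Daniel-PosadaPUJ/Competitive_Programming | universidad/agra/tarea2/weights/weights.py | es_posible_ordenar_con_menores
-- ===== SOURCE A (Python) =====
-- def es_posible_ordenar_con_menores(n, gym):
--     i, answer, prev = 0, True, None
--     while i < len(gym) and answer:
--         j = 0
--         while j < len(gym[i]) and answer:
--             v = gym[i][j]
--             if(v > n):
--                 if prev == None:
--                     prev = v
--                 else:
--                     answer = v == prev
--                     if answer: prev = None
--             j += 1
--         if prev != None:
--             answer = False
--         i += 1
--     return answer
-- ===== SOURCE B (Python) =====
-- def es_posible_ordenar_con_menores(n, gym):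
--     for row in gym:
--         f = [v for v in row if v > n]
--         if len(f) % 2 != 0:
--             return False
--         for k in range(len(f) // 2):
--             if f[2 * k] != f[2 * k + 1]:
--                 return False
--     return True
-- ===== Notes on version B (the rewrite author's own statement) =====
-- stated objective: simpler
-- what changed: Replaces A's interleaved while-loops with a shared answer/prev toggle state by a per-row two-phase check: filter the elements greater than n, then require even length and equality of each indexed pair f[2k]==f[2k+1].
import Mathlib
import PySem

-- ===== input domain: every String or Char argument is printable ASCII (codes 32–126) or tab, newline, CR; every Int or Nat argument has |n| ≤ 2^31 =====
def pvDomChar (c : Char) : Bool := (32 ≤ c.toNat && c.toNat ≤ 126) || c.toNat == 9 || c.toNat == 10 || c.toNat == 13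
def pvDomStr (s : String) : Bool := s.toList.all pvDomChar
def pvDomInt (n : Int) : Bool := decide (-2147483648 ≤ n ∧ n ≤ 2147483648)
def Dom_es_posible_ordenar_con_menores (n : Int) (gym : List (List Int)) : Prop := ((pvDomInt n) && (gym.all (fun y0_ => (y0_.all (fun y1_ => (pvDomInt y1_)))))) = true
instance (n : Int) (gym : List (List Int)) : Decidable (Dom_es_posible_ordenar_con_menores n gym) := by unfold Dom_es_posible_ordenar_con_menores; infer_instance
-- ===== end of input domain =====

-- B replaces A's interleaved while-loops with a shared answer/prev toggle by a per-row
-- filter-then-check-indexed-pairs decomposition (objective: simpler).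

-- ===== PORT A =====
-- inner while loop of A: state is (answer, prev); loop exits when the row ends or answer is false
def pvInnerA (n : Int) : List Int → Bool × Option Int → Bool × Option Int
  | [], st => st
  | v :: rest, (answer, prev) =>
    if answer then
      let st' :=
        if v > n then
          match prev with
          | none => (answer, some v)
          | some p =>
            let answer' := v == p
            if answer' then (answer', none) else (answer', some p)
        else (answer, prev)
      pvInnerA n rest st'
    else (answer, prev)

-- outer while loop of A
def pvOuterA (n : Int) : List (List Int) → Bool × Option Int → Bool × Option Int
  | [], st => st
  | row :: rest, (answer, prev) =>
    if answer then
      let st' := pvInnerA n row (answer, prev)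
      let st'' := if st'.2 ≠ none then (false, st'.2) else st'
      pvOuterA n rest st''
    else (answer, prev)

def es_posible_ordenar_con_menores (n : Int) (gym : List (List Int)) : Bool :=
  (pvOuterA n gym (true, none)).1

-- ===== PORT B =====
-- one row of B: filter the elements > n, then even length + indexed pair comparison
-- (f[2*k] in Source B is always in range there; getD 0 is exact on those indices)
def pvRowOK (n : Int) (row : List Int) : Bool :=
  let f := row.filter (fun v => decide (v > n))
  (f.length % 2 == 0) &&
    (List.range (f.length / 2)).all (fun k => f.getD (2 * k) 0 == f.getD (2 * k + 1) 0)

def es_posible_ordenar_con_menores_alt (n : Int) (gym : List (List Int)) : Bool :=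
  gym.all (pvRowOK n)

-- ===== PRECONDITION & SPEC =====
def Spec_es_posible_ordenar_con_menores (n : Int) (gym : List (List Int)) (out : Bool) : Prop := out = es_posible_ordenar_con_menores_alt n gym
instance (n : Int) (gym : List (List Int)) (out : Bool) : Decidable (Spec_es_posible_ordenar_con_menores n gym out) := by unfold Spec_es_posible_ordenar_con_menores; infer_instance

-- ===== CLAIM (what is proved, stated in full; the proofs are below) =====
def Claim_equal_es_posible_ordenar_con_menores : Prop := ∀ (n : Int) (gym : List (List Int)), Dom_es_posible_ordenar_con_menores n gym → Spec_es_posible_ordenar_con_menores n gym (es_posible_ordenar_con_menores n gym)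

-- ===== LEMMAS AND PROOFS =====

-- pairing automaton on the filtered list (proof-only characterisation of A's inner loop)
def pvChk : List Int → Option Int → Bool × Option Int
  | [], prev => (true, prev)
  | v :: rest, none => pvChk rest (some v)
  | v :: rest, some p => if v == p then pvChk rest none else (false, some p)

-- consecutive equal pairs, recursively (bridge between pvChk and pvRowOK)
def pvPairs : List Int → Bool
  | [] => true
  | [_] => false
  | v :: w :: rest => (v == w) && pvPairs rest

theorem pvInnerA_false (n : Int) (row : List Int) (p : Option Int) :
    pvInnerA n row (false, p) = (false, p) := by
  cases row <;> simp [pvInnerA]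

theorem pvOuterA_false (n : Int) (rows : List (List Int)) (p : Option Int) :
    pvOuterA n rows (false, p) = (false, p) := by
  cases rows <;> simp [pvOuterA]

theorem pvInnerA_eq_chk (n : Int) (row : List Int) (prev : Option Int) :
    pvInnerA n row (true, prev) = pvChk (row.filter (fun v => decide (v > n))) prev := by
  induction row generalizing prev with
  | nil => simp [pvInnerA, pvChk]
  | cons v rest ih =>
    by_cases hv : v > n
    · cases prev with
      | none => simp [pvInnerA, hv, pvChk, ih]
      | some p =>
        by_cases hvp : v = p
        · subst hvp
          simp [pvInnerA, hv, pvChk, ih]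
        · have hb : (v == p) = false := by simp [hvp]
          simp [pvInnerA, hv, pvChk, hb, pvInnerA_false]
    · simp [pvInnerA, hv, ih]

theorem pvChk_char (f : List Int) :
    ((pvChk f none).1 && ((pvChk f none).2 == (none : Option Int))) = pvPairs f := by
  induction f using pvPairs.induct with
  | case1 => simp [pvChk, pvPairs]
  | case2 v => simp [pvChk, pvPairs]
  | case3 v w rest ih =>
    by_cases hvw : v = w
    · simpa [pvChk, pvPairs, hvw] using (by simpa [hvw] using ih)
    · have hwv : ¬ w = v := fun h => hvw h.symm
      simp [pvChk, pvPairs, hvw, hwv]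

theorem pvPairs_eq_rowcheck (f : List Int) :
    pvPairs f = ((f.length % 2 == 0) &&
      (List.range (f.length / 2)).all (fun k => f.getD (2 * k) 0 == f.getD (2 * k + 1) 0)) := by
  induction f using pvPairs.induct with
  | case1 => simp [pvPairs]
  | case2 v => simp [pvPairs]
  | case3 v w rest ih =>
    have hlen : (v :: w :: rest).length = rest.length + 2 := by simp
    have hmod : (rest.length + 2) % 2 = rest.length % 2 := by omega
    have hdiv : (rest.length + 2) / 2 = rest.length / 2 + 1 := by omega
    have hget : (fun k : ℕ =>
          (v :: w :: rest).getD (2 * (k + 1)) 0 == (v :: w :: rest).getD (2 * (k + 1) + 1) 0)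
        = (fun k : ℕ => rest.getD (2 * k) 0 == rest.getD (2 * k + 1) 0) := by
      funext k
      have h1 : 2 * (k + 1) = (2 * k + 1) + 1 := by ring
      rw [h1]
      simp
    rw [hlen, hmod, hdiv, List.range_succ_eq_map]
    simp only [List.all_cons, List.all_map, Function.comp_def]
    rw [hget]
    simp [pvPairs, ih, Bool.and_left_comm]

theorem pvRowOK_char (n : Int) (row : List Int) :
    pvRowOK n row =
      ((pvChk (row.filter (fun v => decide (v > n))) none).1 &&
        ((pvChk (row.filter (fun v => decide (v > n))) none).2 == (none : Option Int))) := by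
  rw [pvChk_char, pvRowOK, pvPairs_eq_rowcheck]

theorem pvOuterA_all (n : Int) (rows : List (List Int)) :
    (pvOuterA n rows (true, none)).1 = rows.all (pvRowOK n) := by
  induction rows with
  | nil => simp [pvOuterA]
  | cons row rest ih =>
    rcases hst : pvChk (row.filter (fun v => decide (v > n))) none with ⟨a, p⟩
    have hrow : pvRowOK n row = (a && (p == (none : Option Int))) := by
      rw [pvRowOK_char, hst]
    cases p with
    | some q =>
      simp [pvOuterA, pvInnerA_eq_chk, hst, pvOuterA_false, hrow]
    | none =>
      cases a with
      | false => simp [pvOuterA, pvInnerA_eq_chk, hst, pvOuterA_false, hrow]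
      | true => simp [pvOuterA, pvInnerA_eq_chk, hst, hrow, ih]

-- ===== VERDICT (by name: the statement is the Claim_ definition above) =====
theorem es_posible_ordenar_con_menores_spec : Claim_equal_es_posible_ordenar_con_menores := by
  intro n gym _
  unfold Spec_es_posible_ordenar_con_menores es_posible_ordenar_con_menores es_posible_ordenar_con_menores_alt
  exact pvOuterA_all n gym
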